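-- pv_equiv track=rewrite | github.com/GMcDowellJr/Revit_Fingerprint | tools/analysis/authority/run_attribute_stress_all_joinable.py | _phase2_items_map_no_dups
-- ===== SOURCE A (Python) =====
-- from typing import Dict, List, Tuple
--
-- def _phase2_items_map_no_dups(record) -> Tuple[Dict[str, Tuple[str, str]], bool]:
--     """Return k -> (q, v) across all phase2 buckets.
--
--     If duplicate k is detected within a single record, returns ({} , True).
--     This is treated as ambiguous and must be excluded by caller.
--     """
--     out: Dict[str, Tuple[str, str]] = {}
--     p2 = record.get("phase2")
--     if not isinstance(p2, dict):
--         return out, False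
--
--     dup = False
--     for bucket in ("semantic_items", "cosmetic_items", "coordination_items", "unknown_items"):
--         items = p2.get(bucket)
--         if not isinstance(items, list):
--             continue
--         for it in items:
--             if not isinstance(it, dict):
--                 continue
--             k = it.get("k")
--             if k is None:
--                 continue
--             ks = str(k)
--             if ks in out:
--                 dup = True
--                 continue
--             q = it.get("q")
--             v = it.get("v")
--             qs = "" if q is None else str(q)
--             vs = "" if v is None else str(v)
--             out[ks] = (qs, vs)
--
--     if dup:
--         return {}, True
--     return out, False
-- ===== SOURCE B (Python) =====
-- def _phase2_items_map_no_dups(record):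
--     """Collect triples in one phase, then check duplicates, then build the dict."""
--     p2 = record.get("phase2")
--     if not isinstance(p2, dict):
--         return {}, False
--
--     triples = []
--     for bucket in ("semantic_items", "cosmetic_items", "coordination_items", "unknown_items"):
--         items = p2.get(bucket)
--         if not isinstance(items, list):
--             continue
--         for it in items:
--             if not isinstance(it, dict):
--                 continue
--             k = it.get("k")
--             if k is None:
--                 continue
--             q = it.get("q")
--             v = it.get("v")
--             triples.append((str(k), "" if q is None else str(q), "" if v is None else str(v)))
--
--     keys = [t[0] for t in triples]
--     if len(keys) != len(set(keys)):
--         return {}, True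
--     return {ks: (qs, vs) for ks, qs, vs in triples}, False
-- ===== Notes on version B (the rewrite author's own statement) =====
-- stated objective: alternative
-- what changed: B splits A's single flag-carrying loop into three separate phases: collect all (k,q,v) triples across the buckets into a flat list, detect duplicate keys with len(keys) != len(set(keys)), and only then build the dict from the triples.
import Mathlib
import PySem

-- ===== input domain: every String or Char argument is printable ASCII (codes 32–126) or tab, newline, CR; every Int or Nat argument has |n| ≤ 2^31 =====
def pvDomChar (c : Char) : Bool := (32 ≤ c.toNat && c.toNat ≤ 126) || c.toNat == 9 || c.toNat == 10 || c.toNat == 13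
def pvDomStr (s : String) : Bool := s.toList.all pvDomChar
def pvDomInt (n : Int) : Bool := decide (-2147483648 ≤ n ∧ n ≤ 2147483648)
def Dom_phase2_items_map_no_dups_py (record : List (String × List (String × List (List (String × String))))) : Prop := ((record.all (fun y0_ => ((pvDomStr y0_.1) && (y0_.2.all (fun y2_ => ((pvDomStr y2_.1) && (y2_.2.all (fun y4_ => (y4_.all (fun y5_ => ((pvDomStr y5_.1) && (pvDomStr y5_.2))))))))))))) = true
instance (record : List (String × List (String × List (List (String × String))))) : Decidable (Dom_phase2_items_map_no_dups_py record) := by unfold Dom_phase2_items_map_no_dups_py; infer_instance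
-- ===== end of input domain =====

-- B separates the work into collect / duplicate-check / build phases instead of A's single
-- flag-carrying loop (objective: alternative decomposition, same asymptotic cost).

-- ===== PORT A =====
-- one item of A's inner loop: k lookup, duplicate check against the accumulated dict, insert
def pvA_step (st : PySem.Dict String (String × String) × Bool) (it : List (String × String)) :
    PySem.Dict String (String × String) × Bool :=
  match (PySem.Dict.mk it).get? "k" with
  | none => st
  | some ks =>
    if st.1.contains ks then (st.1, true)
    else
      let qs := (PySem.Dict.mk it).getD "q" ""
      let vs := (PySem.Dict.mk it).getD "v" ""
      (st.1.insert ks (qs, vs), st.2)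

def phase2_items_map_no_dups_py (record : List (String × List (String × List (List (String × String))))) : (List (String × String × String)) × Bool :=
  let out : PySem.Dict String (String × String) := PySem.Dict.empty
  match (PySem.Dict.mk record).get? "phase2" with
  | none => (out.items, false)
  | some p2 =>
    let st := ["semantic_items", "cosmetic_items", "coordination_items", "unknown_items"].foldl
      (fun st bucket =>
        match (PySem.Dict.mk p2).get? bucket with
        | none => st
        | some items => items.foldl pvA_step st) (out, false)
    if st.2 then ([], true) else (st.1.items, false)

-- ===== PORT B =====
-- phase 1 of B: the flat list of (ks, qs, vs) triples across the four buckets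
def pvB_triples (p2 : List (String × List (List (String × String)))) : List (String × String × String) :=
  ["semantic_items", "cosmetic_items", "coordination_items", "unknown_items"].foldl
    (fun acc bucket =>
      match (PySem.Dict.mk p2).get? bucket with
      | none => acc
      | some items => items.foldl (fun acc it =>
          match (PySem.Dict.mk it).get? "k" with
          | none => acc
          | some ks => acc ++ [(ks, (PySem.Dict.mk it).getD "q" "", (PySem.Dict.mk it).getD "v" "")]) acc) []

def phase2_items_map_no_dups_py_alt (record : List (String × List (String × List (List (String × String))))) : (List (String × String × String)) × Bool :=
  match (PySem.Dict.mk record).get? "phase2" with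
  | none => ([], false)
  | some p2 =>
    let triples := pvB_triples p2
    let keys := triples.map (·.1)
    if keys.length ≠ (PySem.Set.ofList keys).length then ([], true)
    else ((triples.foldl (fun d t => d.insert t.1 t.2) (PySem.Dict.empty : PySem.Dict String (String × String))).items, false)

-- ===== PRECONDITION & SPEC =====
def Spec_phase2_items_map_no_dups_py (record : List (String × List (String × List (List (String × String))))) (out : (List (String × String × String)) × Bool) : Prop := out = phase2_items_map_no_dups_py_alt record
instance (record : List (String × List (String × List (List (String × String))))) (out : (List (String × String × String)) × Bool) : Decidable (Spec_phase2_items_map_no_dups_py record out) := by unfold Spec_phase2_items_map_no_dups_py; infer_instance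

-- ===== CLAIM (what is proved, stated in full; the proofs are below) =====
def Claim_equal_phase2_items_map_no_dups_py : Prop := ∀ (record : List (String × List (String × List (List (String × String))))), Dom_phase2_items_map_no_dups_py record → Spec_phase2_items_map_no_dups_py record (phase2_items_map_no_dups_py record)

-- ===== LEMMAS AND PROOFS =====

-- the triples one item list contributes
def pvTrips (items : List (List (String × String))) : List (String × String × String) :=
  items.filterMap (fun it =>
    ((PySem.Dict.mk it).get? "k").map
      (fun ks => (ks, (PySem.Dict.mk it).getD "q" "", (PySem.Dict.mk it).getD "v" "")))

-- the flat triple list both programs effectively traverse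
def pvT (p2 : List (String × List (List (String × String)))) : List (String × String × String) :=
  ["semantic_items", "cosmetic_items", "coordination_items", "unknown_items"].flatMap
    (fun bucket =>
      match (PySem.Dict.mk p2).get? bucket with
      | none => []
      | some items => pvTrips items)

theorem pvB_inner (items : List (List (String × String))) (acc : List (String × String × String)) :
    items.foldl (fun acc it =>
      match (PySem.Dict.mk it).get? "k" with
      | none => acc
      | some ks => acc ++ [(ks, (PySem.Dict.mk it).getD "q" "", (PySem.Dict.mk it).getD "v" "")]) acc
    = acc ++ pvTrips items := by
  induction items generalizing acc with
  | nil => simp [pvTrips]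
  | cons it items ih =>
    simp only [List.foldl_cons]
    cases h : (PySem.Dict.mk it).get? "k" <;>
      simp [pvTrips, h, ih]

theorem pvB_eq_T (p2 : List (String × List (List (String × String)))) : pvB_triples p2 = pvT p2 := by
  simp only [pvB_triples, pvT, List.foldl_cons, List.foldl_nil, List.flatMap_cons, List.flatMap_nil]
  cases h1 : (PySem.Dict.mk p2).get? "semantic_items" <;>
  cases h2 : (PySem.Dict.mk p2).get? "cosmetic_items" <;>
  cases h3 : (PySem.Dict.mk p2).get? "coordination_items" <;>
  cases h4 : (PySem.Dict.mk p2).get? "unknown_items" <;>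
    simp [pvB_inner, List.append_assoc]

theorem pvA_inner (items : List (List (String × String))) (st : PySem.Dict String (String × String) × Bool) :
    items.foldl pvA_step st
    = (pvTrips items).foldl
        (fun st t => if st.1.contains t.1 then (st.1, true) else (st.1.insert t.1 t.2, st.2)) st := by
  induction items generalizing st with
  | nil => simp [pvTrips]
  | cons it items ih =>
    simp only [List.foldl_cons]
    cases h : (PySem.Dict.mk it).get? "k" <;>
      simp [pvTrips, h, ih, pvA_step]

theorem pvA_eq_T (p2 : List (String × List (List (String × String)))) (st : PySem.Dict String (String × String) × Bool) :
    ["semantic_items", "cosmetic_items", "coordination_items", "unknown_items"].foldl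
      (fun st bucket =>
        match (PySem.Dict.mk p2).get? bucket with
        | none => st
        | some items => items.foldl pvA_step st) st
    = (pvT p2).foldl
        (fun st t => if st.1.contains t.1 then (st.1, true) else (st.1.insert t.1 t.2, st.2)) st := by
  simp only [pvT, List.foldl_cons, List.foldl_nil, List.flatMap_cons, List.flatMap_nil]
  cases h1 : (PySem.Dict.mk p2).get? "semantic_items" <;>
  cases h2 : (PySem.Dict.mk p2).get? "cosmetic_items" <;>
  cases h3 : (PySem.Dict.mk p2).get? "coordination_items" <;>
  cases h4 : (PySem.Dict.mk p2).get? "unknown_items" <;>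
    simp [pvA_inner, List.foldl_append]

-- A's dup flag is exactly "some key of l clashes with d.keys or an earlier key of l"
theorem pvA_dup (l : List (String × String × String)) (d : PySem.Dict String (String × String)) (b : Bool)
    (hd : d.keys.Nodup) :
    (l.foldl (fun st t => if st.1.contains t.1 then (st.1, true) else (st.1.insert t.1 t.2, st.2)) (d, b)).2
    = (b || !decide ((d.keys ++ l.map (·.1)).Nodup)) := by
  induction l generalizing d b with
  | nil => simp [hd]
  | cons t l ih =>
    simp only [List.foldl_cons]
    by_cases hc : d.contains t.1 = true
    · have hk : t.1 ∈ d.keys := (PySem.Dict.contains_iff_mem_keys d t.1).1 hc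
      have hnd : ¬ (d.keys ++ t.1 :: l.map (·.1)).Nodup := by
        intro h
        exact (List.disjoint_of_nodup_append h) hk (by simp)
      simp [hc, ih d true hd, hnd]
    · have hc' : d.contains t.1 = false := by simpa using hc
      have hk : t.1 ∉ d.keys := fun h => hc ((PySem.Dict.contains_iff_mem_keys d t.1).2 h)
      have hkeys : (d.insert t.1 t.2).keys = d.keys ++ [t.1] :=
        PySem.Dict.keys_insert_of_not_contains d t.2 hc'
      have hnd' : (d.insert t.1 t.2).keys.Nodup := by
        rw [hkeys]
        refine hd.append (List.nodup_singleton _) ?_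
        intro a ha hb
        rw [List.mem_singleton] at hb
        exact hk (hb ▸ ha)
      simp only [hc', Bool.false_eq_true, if_false]
      rw [ih _ b hnd', hkeys, List.append_assoc]
      rfl

-- on clash-free keys A's loop is just B's plain insert fold
theorem pvA_insert (l : List (String × String × String)) (d : PySem.Dict String (String × String)) (b : Bool)
    (hnd : (d.keys ++ l.map (·.1)).Nodup) :
    l.foldl (fun st t => if st.1.contains t.1 then (st.1, true) else (st.1.insert t.1 t.2, st.2)) (d, b)
    = (l.foldl (fun d t => d.insert t.1 t.2) d, b) := by
  induction l generalizing d b with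
  | nil => simp
  | cons t l ih =>
    have hk : t.1 ∉ d.keys := by
      intro h
      exact (List.disjoint_of_nodup_append hnd) h (by simp)
    have hc : d.contains t.1 = false := by
      by_contra h
      exact hk ((PySem.Dict.contains_iff_mem_keys d t.1).1 (by simpa using h))
    have hkeys : (d.insert t.1 t.2).keys = d.keys ++ [t.1] :=
      PySem.Dict.keys_insert_of_not_contains d t.2 hc
    simp only [List.foldl_cons, hc, Bool.false_eq_true, if_false]
    exact ih (d.insert t.1 t.2) b (by rw [hkeys]; simpa [List.append_assoc] using hnd)

-- len(set(keys)) == len(keys) iff keys are duplicate-free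
theorem pv_len_ofList (xs : List String) :
    (PySem.Set.ofList xs).length = xs.length ↔ xs.Nodup := by
  constructor
  · intro h
    induction xs with
    | nil => simp
    | cons x xs ih =>
      rw [PySem.Set.ofList_cons] at h
      simp only [List.length_cons, PySem.Set.discard] at h
      have hle : ((PySem.Set.ofList xs).filter (fun y => !(y == x))).length ≤ (PySem.Set.ofList xs).length :=
        List.length_filter_le _ _
      have hle2 : (PySem.Set.ofList xs).length ≤ xs.length := PySem.Set.length_ofList_le xs
      have heq : (PySem.Set.ofList xs).length = xs.length := by omega
      have hfix : (PySem.Set.ofList xs).filter (fun y => !(y == x)) = PySem.Set.ofList xs :=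
        List.Sublist.eq_of_length List.filter_sublist (by omega)
      have hx : x ∉ xs := by
        intro hx
        have hxm : x ∈ PySem.Set.ofList xs := (PySem.Set.mem_ofList xs x).2 hx
        have := List.of_mem_filter (p := fun y => !(y == x)) (hfix ▸ hxm)
        simp at this
      exact (ih heq).cons hx
  · intro h
    rw [PySem.Set.ofList_eq_self_of_nodup xs h]

theorem pv_main : ∀ (record : List (String × List (String × List (List (String × String))))), phase2_items_map_no_dups_py record = phase2_items_map_no_dups_py_alt record := by
  intro record
  unfold phase2_items_map_no_dups_py phase2_items_map_no_dups_py_alt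
  cases hp : (PySem.Dict.mk record).get? "phase2" with
  | none => rfl
  | some p2 =>
    simp only [pvA_eq_T, pvB_eq_T]
    have hnd0 : ((PySem.Dict.empty : PySem.Dict String (String × String)).keys ++ (pvT p2).map (·.1)).Nodup ↔ ((pvT p2).map (·.1)).Nodup := by
      simp [PySem.Dict.empty]
    by_cases hdup : ((pvT p2).map (·.1)).Nodup
    · have h2 := pvA_insert (pvT p2) PySem.Dict.empty false (hnd0.2 hdup)
      have hkey : (PySem.Set.ofList ((pvT p2).map (·.1))).length = ((pvT p2).map (·.1)).length :=
        (pv_len_ofList _).2 hdup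
      rw [h2]
      simp [hkey]
    · have hflag : ((pvT p2).foldl (fun st t => if st.1.contains t.1 then (st.1, true) else (st.1.insert t.1 t.2, st.2)) (PySem.Dict.empty, false)).2 = true := by
        rw [pvA_dup (pvT p2) PySem.Dict.empty false (by simp [PySem.Dict.empty])]
        simpa [PySem.Dict.empty] using hdup
      have hlen : (pvT p2).length ≠ (PySem.Set.ofList ((pvT p2).map (·.1))).length := by
        intro h
        exact hdup ((pv_len_ofList _).1 (by simpa using h.symm))
      simp [hflag, hlen]

-- ===== VERDICT (by name: the statement is the Claim_ definition above) =====
theorem phase2_items_map_no_dups_py_spec : Claim_equal_phase2_items_map_no_dups_py := by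
  intro record _
  unfold Spec_phase2_items_map_no_dups_py
  exact pv_main record
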